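-- pv_equiv track=rewrite | github.com/sokirko74/vanya | movements.py | check_fuzzy_increase
-- ===== SOURCE A (Python) =====
-- def check_fuzzy_increase(integers):
--     if len(integers) == 0:
--         return True
--     max_v = integers[0]
--     for v in integers:
--         if v > max_v:
--             max_v = v
--         elif max_v - v > 10:
--             return False
--     return True
-- ===== SOURCE B (Python) =====
-- def check_fuzzy_increase(integers):
--     # Divide and conquer: a drop >10 from an earlier element to a later one
--     # lies entirely in the left half, entirely in the right half, or crosses
--     # the split, where it is witnessed by max(left) - min(right).
--     if len(integers) <= 1:
--         return True
--     mid = len(integers) // 2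
--     left, right = integers[:mid], integers[mid:]
--     return (check_fuzzy_increase(left)
--             and check_fuzzy_increase(right)
--             and max(left) - min(right) <= 10)
-- ===== Notes on version B (the rewrite author's own statement) =====
-- stated objective: alternative
-- what changed: Replaces the single stateful running-max scan by a divide-and-conquer check: recurse on the two halves and compare max(left half) with min(right half) for cross-split drops.
import Mathlib
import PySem

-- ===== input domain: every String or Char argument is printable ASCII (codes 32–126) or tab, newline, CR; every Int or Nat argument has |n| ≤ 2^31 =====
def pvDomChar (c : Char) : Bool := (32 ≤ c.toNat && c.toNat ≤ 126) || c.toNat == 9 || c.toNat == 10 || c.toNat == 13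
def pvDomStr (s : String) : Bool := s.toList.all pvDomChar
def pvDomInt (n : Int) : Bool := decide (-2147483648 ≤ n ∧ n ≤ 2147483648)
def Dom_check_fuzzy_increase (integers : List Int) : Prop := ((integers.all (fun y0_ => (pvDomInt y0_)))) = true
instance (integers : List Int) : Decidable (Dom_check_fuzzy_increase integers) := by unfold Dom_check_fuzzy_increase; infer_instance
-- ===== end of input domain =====

-- B replaces A's single running-max scan by a divide-and-conquer check (recurse on halves, compare max(left) with min(right)); alternative algorithm, same return value.


-- ===== PORT A =====
-- the for-loop with early return, carrying max_v
def pvLoopA (max_v : Int) : List Int → Bool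
  | [] => true
  | v :: rest =>
      if v > max_v then pvLoopA v rest
      else if max_v - v > 10 then false
      else pvLoopA max_v rest

def check_fuzzy_increase (integers : List Int) : Bool :=
  match integers with
  | [] => true
  | x :: _ => pvLoopA x integers

-- ===== PORT B =====
-- divide and conquer; integers[:mid] / integers[mid:] with 0 ≤ mid ≤ len are exactly take/drop
-- (PySem.List.slice_to_natCast / slice_from_natCast); max/min are on provably nonempty halves,
-- ported via PySem.List.max?/min? with a .getD 0 default that is never reached.
def check_fuzzy_increase_alt (integers : List Int) : Bool :=
  if integers.length ≤ 1 then true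
  else
    let mid := integers.length / 2
    let left := integers.take mid
    let right := integers.drop mid
    check_fuzzy_increase_alt left && check_fuzzy_increase_alt right &&
      decide (((PySem.List.max? left (fun y => y)).getD 0)
              - ((PySem.List.min? right (fun y => y)).getD 0) ≤ 10)
termination_by integers.length
decreasing_by
  · simp only [List.length_take]; omega
  · simp only [List.length_drop]; omega

-- ===== PRECONDITION & SPEC =====
def Spec_check_fuzzy_increase (integers : List Int) (out : Bool) : Prop := out = check_fuzzy_increase_alt integers
instance (integers : List Int) (out : Bool) : Decidable (Spec_check_fuzzy_increase integers out) := by unfold Spec_check_fuzzy_increase; infer_instance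

-- ===== CLAIM (what is proved, stated in full; the proofs are below) =====
def Claim_equal_check_fuzzy_increase : Prop := ∀ (integers : List Int), Dom_check_fuzzy_increase integers → Spec_check_fuzzy_increase integers (check_fuzzy_increase integers)

-- ===== LEMMAS AND PROOFS =====
-- Both programs decide the same property: no element is more than 10 below an earlier one.
theorem pvLoopA_iff (l : List Int) : ∀ m : Int,
    pvLoopA m l = true ↔
      (l.Pairwise (fun x y => x - y ≤ 10) ∧ ∀ y ∈ l, m - y ≤ 10) := by
  induction l with
  | nil => intro m; simp [pvLoopA]
  | cons v rest ih =>
      intro m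
      simp only [pvLoopA, List.pairwise_cons, List.mem_cons]
      by_cases h : v > m
      · rw [if_pos h, ih v]
        constructor
        · rintro ⟨hp, hv⟩
          exact ⟨⟨hv, hp⟩, by rintro y (rfl | hy); omega; have := hv y hy; omega⟩
        · rintro ⟨⟨hv, hp⟩, _⟩; exact ⟨hp, hv⟩
      · rw [if_neg h]
        by_cases h2 : m - v > 10
        · rw [if_pos h2]
          simp only [Bool.false_eq_true, false_iff]
          rintro ⟨_, hm⟩
          have := hm v (Or.inl rfl); omega
        · rw [if_neg h2, ih m]
          constructor
          · rintro ⟨hp, hm⟩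
            refine ⟨⟨fun y hy => ?_, hp⟩, ?_⟩
            · have := hm y hy; omega
            · rintro y (rfl | hy); omega; exact hm y hy
          · rintro ⟨⟨_, hp⟩, hm⟩
            exact ⟨hp, fun y hy => hm y (Or.inr hy)⟩

theorem portA_iff (l : List Int) :
    check_fuzzy_increase l = true ↔ l.Pairwise (fun x y => x - y ≤ 10) := by
  match l with
  | [] => simp [check_fuzzy_increase]
  | x :: rest =>
      simp only [check_fuzzy_increase]
      rw [pvLoopA_iff (x :: rest) x]
      simp only [List.pairwise_cons, List.mem_cons]
      constructor
      · rintro ⟨hp, _⟩; exact hp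
      · rintro ⟨hx, hp⟩
        exact ⟨⟨hx, hp⟩, by rintro y (rfl | hy); omega; have := hx y hy; omega⟩

theorem portB_iff (l : List Int) :
    check_fuzzy_increase_alt l = true ↔ l.Pairwise (fun x y => x - y ≤ 10) := by
  fun_induction check_fuzzy_increase_alt l with
  | case1 l h =>
      match l, h with
      | [], _ => simp
      | [x], _ => simp
  | case2 l h mid left right ihl ihr =>
      simp only [Bool.and_eq_true, decide_eq_true_eq]
      have hsplit : l.take (l.length / 2) ++ l.drop (l.length / 2) = l :=
        List.take_append_drop _ l
      conv_rhs => rw [← hsplit]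
      rw [List.pairwise_append]
      -- both halves are nonempty
      have hlen : 2 ≤ l.length := by omega
      have hlne : l.take (l.length / 2) ≠ [] := by
        simp only [ne_eq, ← List.length_eq_zero_iff, List.length_take]; omega
      have hrne : l.drop (l.length / 2) ≠ [] := by
        simp only [ne_eq, ← List.length_eq_zero_iff, List.length_drop]; omega
      obtain ⟨M, hM⟩ : ∃ M, PySem.List.max? (l.take (l.length / 2)) (fun y : Int => y) = some M :=
        Option.ne_none_iff_exists'.mp
          (fun hn => hlne ((PySem.List.max?_eq_none_iff _ _).mp hn))
      obtain ⟨m, hm⟩ : ∃ m, PySem.List.min? (l.drop (l.length / 2)) (fun y : Int => y) = some m :=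
        Option.ne_none_iff_exists'.mp
          (fun hn => hrne ((PySem.List.min?_eq_none_iff _ _).mp hn))
      rw [hM, hm]
      simp only [Option.getD_some]
      have hMmem := PySem.List.max?_mem hM
      have hmmem := PySem.List.min?_mem hm
      have hMmax := PySem.List.max?_isMax hM
      have hmmin := PySem.List.min?_isMin hm
      constructor
      · rintro ⟨⟨hl, hr⟩, hcross⟩
        refine ⟨ihl.mp hl, ihr.mp hr, fun x hx y hy => ?_⟩
        have h1 := hMmax x hx
        have h2 := hmmin y hy
        simp only at h1 h2
        omega
      · rintro ⟨hl, hr, hcross⟩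
        exact ⟨⟨ihl.mpr hl, ihr.mpr hr⟩, hcross M hMmem m hmmem⟩

-- ===== VERDICT (by name: the statement is the Claim_ definition above) =====
theorem check_fuzzy_increase_spec : Claim_equal_check_fuzzy_increase := by
  intro l _
  unfold Spec_check_fuzzy_increase
  have ha := portA_iff l
  have hb := portB_iff l
  cases hA : check_fuzzy_increase l <;> cases hB : check_fuzzy_increase_alt l <;>
    simp_all
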